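-- pv_equiv track=rewrite | github.com/Chanhook/BOJ-and-Programmers-Algorithm | 프로그래머스/unrated/150368. 이모티콘 할인행사/이모티콘 할인행사.py | solution
-- ===== SOURCE A (Python) =====
-- import heapq
--
-- def solution(users, emoticons):
--     answer = []
--     emo_sale = [0] * len(emoticons)
--
--     def dfs(idx, users):
--         if idx < 0:
--             heap = [0, 0]
--             for user in users:
--                 total = 0
--                 for i in range(len(emo_sale)):
--                     if user[0] <= emo_sale[i]:
--                         total += emoticons[i] - (emoticons[i] * emo_sale[i] // 100)
--                 if total >= user[1]:
--                     heap[0] += 1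
--                 else:
--                     heap[1] += total
--             heapq.heappush(answer, (-heap[0], -heap[1]))
--             return
--
--         for sale in [40, 30, 20, 10]:
--             emo_sale[idx] = sale
--             dfs(idx - 1, users)
--
--     dfs(len(emoticons) - 1, users)
--     register, sales = heapq.heappop(answer)
--     return [-register, -sales]
-- ===== SOURCE B (Python) =====
-- def solution(users, emoticons):
--     combos = [[]]
--     for _ in emoticons:
--         combos = [[s] + c for s in [40, 30, 20, 10] for c in combos]
--     best = None
--     for sales in combos:
--         register = 0
--         total_sales = 0
--         for user in users:
--             total = sum(p - p * s // 100 for p, s in zip(emoticons, sales) if user[0] <= s)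
--             if total >= user[1]:
--                 register += 1
--             else:
--                 total_sales += total
--         cur = (register, total_sales)
--         if best is None or cur > best:
--             best = cur
--     return [best[0], best[1]]
-- ===== Notes on version B (the rewrite author's own statement) =====
-- stated objective: simpler
-- what changed: Replaces A's recursive dfs over discount choices plus a heap of all (-register,-sales) tuples popped once, by an explicit product list of discount combinations scanned with a single running lexicographic max; per-user totals use zip/sum instead of index loops.
import Mathlib
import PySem

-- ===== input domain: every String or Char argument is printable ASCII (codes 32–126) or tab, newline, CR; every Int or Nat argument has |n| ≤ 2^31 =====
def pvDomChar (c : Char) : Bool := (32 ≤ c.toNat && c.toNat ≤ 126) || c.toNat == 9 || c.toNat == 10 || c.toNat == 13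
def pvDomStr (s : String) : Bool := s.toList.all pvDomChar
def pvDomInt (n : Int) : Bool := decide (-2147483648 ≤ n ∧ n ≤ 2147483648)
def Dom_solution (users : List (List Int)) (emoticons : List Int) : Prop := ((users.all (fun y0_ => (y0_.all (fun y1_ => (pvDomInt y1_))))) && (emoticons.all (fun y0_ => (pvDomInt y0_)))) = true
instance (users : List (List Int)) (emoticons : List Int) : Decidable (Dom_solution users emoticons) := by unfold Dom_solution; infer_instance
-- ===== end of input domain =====

-- B replaces A's recursive dfs + heap-of-all-results with an explicit product list of
-- discount combinations and a single running lexicographic max (simpler decomposition).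


-- ===== PORT A =====
-- Python tuple comparison (r1, s1) < (r2, s2), lexicographic.
def pvLexLt (a b : Int × Int) : Bool := a.1 < b.1 || (a.1 == b.1 && a.2 < b.2)

-- dfs's base case (idx < 0): heap = [0, 0] updated per user; ported as a pair fold.
-- user[0]/user[1] are in range under Pre_solution, emo_sale/emoticons indices always are,
-- so getD is exact here.
def pvEvalA (users : List (List Int)) (emoticons : List Int) (emo_sale : List Int) : Int × Int :=
  users.foldl (fun heap user =>
    let total := (List.range emo_sale.length).foldl (fun t i =>
      if user.getD 0 0 ≤ emo_sale.getD i 0 then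
        t + (emoticons.getD i 0 - PySem.Int.floordiv (emoticons.getD i 0 * emo_sale.getD i 0) 100)
      else t) 0
    if total ≥ user.getD 1 0 then (heap.1 + 1, heap.2) else (heap.1, heap.2 + total)) (0, 0)

-- dfs(idx, users) with k = idx + 1; `answer` threads the mutated heap list;
-- heappush is ported as an append (the pop below takes the minimum).
def pvDfsA (users : List (List Int)) (emoticons : List Int) :
    Nat → List Int → List (Int × Int) → List (Int × Int)
  | 0, emo_sale, answer =>
      let h := pvEvalA users emoticons emo_sale
      answer ++ [(-h.1, -h.2)]
  | k + 1, emo_sale, answer =>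
      ([40, 30, 20, 10] : List Int).foldl
        (fun ans sale => pvDfsA users emoticons k (emo_sale.set k sale) ans) answer

-- heapq.heappop after only pushes returns the minimum of the pushed tuples (heapq's
-- contract; exact for A's push-then-single-pop usage). [] is unreachable: dfs pushes ≥ 1.
def pvHeapMin : List (Int × Int) → Int × Int
  | [] => (0, 0)
  | x :: xs => xs.foldl (fun m y => if pvLexLt y m then y else m) x

def solution (users : List (List Int)) (emoticons : List Int) : List Int :=
  let answer := pvDfsA users emoticons emoticons.length (List.replicate emoticons.length 0) []
  let m := pvHeapMin answer
  [-m.1, -m.2]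

-- ===== PORT B =====
-- combos built by len(emoticons) iterations of `[[s] + c for s in [40,30,20,10] for c in combos]`
def pvCombos : Nat → List (List Int)
  | 0 => [[]]
  | n + 1 => ([40, 30, 20, 10] : List Int).flatMap (fun s => (pvCombos n).map (fun c => s :: c))

-- per-combo (register, total_sales); total = sum(p - p*s//100 for p, s in zip(...) if user[0] <= s)
def pvEvalB (users : List (List Int)) (emoticons : List Int) (sales : List Int) : Int × Int :=
  users.foldl (fun rs user =>
    let total := (((emoticons.zip sales).filter (fun ps => user.getD 0 0 ≤ ps.2)).map
      (fun ps => ps.1 - PySem.Int.floordiv (ps.1 * ps.2) 100)).sum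
    if total ≥ user.getD 1 0 then (rs.1 + 1, rs.2) else (rs.1, rs.2 + total)) (0, 0)

-- `if best is None or cur > best: best = cur`
def pvStepB (best : Option (Int × Int)) (cur : Int × Int) : Option (Int × Int) :=
  match best with
  | none => some cur
  | some b => if pvLexLt b cur then some cur else some b

def solution_alt (users : List (List Int)) (emoticons : List Int) : List Int :=
  match (pvCombos emoticons.length).foldl
      (fun best sales => pvStepB best (pvEvalB users emoticons sales)) none with
  | some b => [b.1, b.2]
  | none => [0, 0]   -- unreachable: combos is never empty

-- ===== PRECONDITION & SPEC =====
-- Pre_ excludes exactly the inputs where A raises IndexError: a user list with fewer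
-- than two entries (user[0] and user[1] are read).
def Pre_solution (users : List (List Int)) (emoticons : List Int) : Prop :=
  ∀ u ∈ users, 2 ≤ u.length
instance (users : List (List Int)) (emoticons : List Int) : Decidable (Pre_solution users emoticons) := by unfold Pre_solution; infer_instance

def pvWitness_solution : List (List Int) × List Int := ([[50, 100], [20, 300]], [100, 50])

def Spec_solution (users : List (List Int)) (emoticons : List Int) (out : List Int) : Prop := out = solution_alt users emoticons
instance (users : List (List Int)) (emoticons : List Int) (out : List Int) : Decidable (Spec_solution users emoticons out) := by unfold Spec_solution; infer_instance

-- ===== CLAIM (what is proved, stated in full; the proofs are below) =====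
def Claim_equal_solution : Prop := ∀ (users : List (List Int)) (emoticons : List Int), Dom_solution users emoticons → Pre_solution users emoticons → Spec_solution users emoticons (solution users emoticons)

-- ===== LEMMAS AND PROOFS =====

def pvS : List Int := [40, 30, 20, 10]
def pvMin (m y : Int × Int) : Int × Int := if pvLexLt y m then y else m
def pvMax (b x : Int × Int) : Int × Int := if pvLexLt b x then x else b
def pvNeg (p : Int × Int) : Int × Int := (-p.1, -p.2)
def pvOMin (o : Option (Int × Int)) (x : Int × Int) : Option (Int × Int) :=
  match o with | none => some x | some m => some (pvMin m x)

theorem pvLexLt_neg (a b : Int × Int) : pvLexLt (pvNeg a) (pvNeg b) = pvLexLt b a := by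
  obtain ⟨a1, a2⟩ := a; obtain ⟨b1, b2⟩ := b
  simp only [pvLexLt, pvNeg]
  rw [Bool.eq_iff_iff]
  simp only [Bool.or_eq_true, Bool.and_eq_true, decide_eq_true_eq, beq_iff_eq]
  omega

theorem pvLexLt_total {a b : Int × Int} (h1 : ¬ pvLexLt a b = true) (h2 : ¬ pvLexLt b a = true) : a = b := by
  obtain ⟨a1, a2⟩ := a; obtain ⟨b1, b2⟩ := b
  simp only [pvLexLt, Bool.or_eq_true, Bool.and_eq_true, decide_eq_true_eq, beq_iff_eq] at h1 h2
  have : a1 = b1 ∧ a2 = b2 := by omega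
  simp [this.1, this.2]

theorem pvLexLt_asymm {a b : Int × Int} (h1 : pvLexLt a b = true) : ¬ pvLexLt b a = true := by
  obtain ⟨a1, a2⟩ := a; obtain ⟨b1, b2⟩ := b
  simp only [pvLexLt, Bool.or_eq_true, Bool.and_eq_true, decide_eq_true_eq, beq_iff_eq] at h1 ⊢
  omega

theorem pvLexLt_trans {a b c : Int × Int} (h1 : pvLexLt a b = true) (h2 : pvLexLt b c = true) : pvLexLt a c = true := by
  obtain ⟨a1, a2⟩ := a; obtain ⟨b1, b2⟩ := b; obtain ⟨c1, c2⟩ := c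
  simp only [pvLexLt, Bool.or_eq_true, Bool.and_eq_true, decide_eq_true_eq, beq_iff_eq] at h1 h2 ⊢
  omega

theorem pvLexLt_nlt_trans {a b c : Int × Int} (h1 : ¬ pvLexLt a b = true) (h2 : ¬ pvLexLt b c = true)
    (h3 : pvLexLt a c = true) : False := by
  obtain ⟨a1, a2⟩ := a; obtain ⟨b1, b2⟩ := b; obtain ⟨c1, c2⟩ := c
  simp only [pvLexLt, Bool.or_eq_true, Bool.and_eq_true, decide_eq_true_eq, beq_iff_eq] at h1 h2 h3
  omega

theorem pvMax_comm (a b : Int × Int) : pvMax a b = pvMax b a := by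
  unfold pvMax; split_ifs with h1 h2 h2
  · exact absurd h2 (pvLexLt_asymm h1)
  · rfl
  · rfl
  · exact pvLexLt_total h1 h2

theorem pvMax_assoc (a b c : Int × Int) : pvMax (pvMax a b) c = pvMax a (pvMax b c) := by
  by_cases h1 : pvLexLt a b = true
  · by_cases h2 : pvLexLt b c = true
    · simp [pvMax, h1, h2, pvLexLt_trans h1 h2]
    · simp [pvMax, h1, h2]
  · by_cases h2 : pvLexLt b c = true
    · simp [pvMax, h1, h2]
    · have h3 : ¬ pvLexLt a c = true := fun h => pvLexLt_nlt_trans h1 h2 h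
      simp [pvMax, h1, h2, h3]

theorem pvStepB_some (u v : Int × Int) : pvStepB (some u) v = some (pvMax u v) := by
  show (if pvLexLt u v then some v else some u) = some (pvMax u v)
  unfold pvMax; split <;> rfl

theorem pvStepB_rcomm (o : Option (Int × Int)) (x y : Int × Int) :
    pvStepB (pvStepB o x) y = pvStepB (pvStepB o y) x := by
  cases o with
  | none =>
      show pvStepB (some x) y = pvStepB (some y) x
      rw [pvStepB_some, pvStepB_some, pvMax_comm]
  | some b =>
      rw [pvStepB_some, pvStepB_some, pvStepB_some, pvStepB_some,
        pvMax_assoc, pvMax_assoc, pvMax_comm x y]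

-- the emo_sale lists A's dfs evaluates (indices k-1 .. 0 overwritten with each choice)
def pvProdRev : Nat → List Int → List (List Int)
  | 0, es => [es]
  | k + 1, es => pvS.flatMap (fun s => pvProdRev k (es.set k s))

-- combinations with the LAST position varying slowest
def pvRp : Nat → List (List Int)
  | 0 => [[]]
  | k + 1 => pvS.flatMap (fun s => (pvRp k).map (fun c => c ++ [s]))

theorem pvDfsA_spec (users : List (List Int)) (emoticons : List Int) :
    ∀ (k : Nat) (es : List Int) (ans : List (Int × Int)),
      pvDfsA users emoticons k es ans
        = ans ++ (pvProdRev k es).map (fun e => pvNeg (pvEvalA users emoticons e)) := by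
  intro k
  induction k with
  | zero => intro es ans; rfl
  | succ k ih =>
      intro es ans
      show pvS.foldl (fun a s => pvDfsA users emoticons k (es.set k s) a) ans = _
      rw [PySem.List.foldl_congr_mem pvS _ (fun a s => a ++ (pvProdRev k (es.set k s)).map (fun e => pvNeg (pvEvalA users emoticons e))) ans (fun a s _ => ih (es.set k s) a)]
      rw [PySem.List.foldl_append_eq_flatMap]
      show ans ++ pvS.flatMap (fun s => (pvProdRev k (es.set k s)).map _) = _
      rw [← List.map_flatMap]
      rfl

theorem pvProdRev_eq : ∀ (k : Nat) (es : List Int), k ≤ es.length →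
    pvProdRev k es = (pvRp k).map (fun c => c ++ es.drop k) := by
  intro k
  induction k with
  | zero => intro es _; simp [pvProdRev, pvRp]
  | succ k ih =>
      intro es hk
      have hset : ∀ s : Int, (es.set k s).drop k = s :: es.drop (k + 1) := by
        intro s
        rw [List.set_eq_take_append_cons_drop]
        have hlt : k < es.length := by omega
        rw [if_pos hlt]
        have hlen : (List.take k es).length = k := by simp; omega
        calc (List.take k es ++ s :: List.drop (k+1) es).drop k
            = (List.take k es ++ s :: List.drop (k+1) es).drop (List.take k es).length := by rw [hlen]
          _ = s :: List.drop (k+1) es := List.drop_left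
      show pvS.flatMap (fun s => pvProdRev k (es.set k s)) = _
      have hbr : ∀ s ∈ pvS, pvProdRev k (es.set k s)
          = ((pvRp k).map (fun c => c ++ [s])).map (fun c => c ++ es.drop (k + 1)) := by
        intro s _
        rw [ih (es.set k s) (by simp; omega)]
        rw [List.map_map]
        apply List.map_congr_left
        intro c _
        simp [hset s, Function.comp]
      calc pvS.flatMap (fun s => pvProdRev k (es.set k s))
          = pvS.flatMap (fun s => ((pvRp k).map (fun c => c ++ [s])).map (fun c => c ++ es.drop (k + 1))) :=
            List.flatMap_congr hbr
        _ = (pvRp (k+1)).map (fun c => c ++ es.drop (k + 1)) := by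
            show _ = (pvS.flatMap (fun s => (pvRp k).map (fun c => c ++ [s]))).map _
            rw [List.map_flatMap]

theorem pvRp_eq_map_reverse : ∀ k : Nat, pvRp k = (pvCombos k).map List.reverse := by
  intro k
  induction k with
  | zero => rfl
  | succ k ih =>
      show pvS.flatMap (fun s => (pvRp k).map (fun c => c ++ [s]))
        = (pvS.flatMap (fun s => (pvCombos k).map (fun c => s :: c))).map List.reverse
      rw [List.map_flatMap]
      apply List.flatMap_congr
      intro s _
      rw [ih, List.map_map, List.map_map]
      apply List.map_congr_left
      intro c _
      simp [Function.comp]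

theorem pvMem_combos : ∀ (k : Nat) (c : List Int),
    c ∈ pvCombos k ↔ c.length = k ∧ ∀ x ∈ c, x ∈ pvS := by
  intro k
  induction k with
  | zero => intro c; simp [pvCombos, List.length_eq_zero_iff]; rintro rfl; simp
  | succ k ih =>
      intro c
      constructor
      · intro hc
        simp only [pvCombos, List.mem_flatMap, List.mem_map] at hc
        obtain ⟨s, hs, d, hd, rfl⟩ := hc
        obtain ⟨hl, hall⟩ := (ih d).mp hd
        refine ⟨by simp [hl], ?_⟩
        intro x hx
        rcases List.mem_cons.mp hx with rfl | hx
        · exact hs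
        · exact hall x hx
      · rintro ⟨hl, hall⟩
        cases c with
        | nil => simp at hl
        | cons s d =>
            simp only [pvCombos, List.mem_flatMap, List.mem_map]
            exact ⟨s, hall s (by simp), d,
              (ih d).mpr ⟨by simpa using hl, fun x hx => hall x (by simp [hx])⟩, rfl⟩

theorem pvNodup_combos : ∀ k : Nat, (pvCombos k).Nodup := by
  intro k
  induction k with
  | zero => simp [pvCombos]
  | succ k ih =>
      show (pvS.flatMap (fun s => (pvCombos k).map (fun c => s :: c))).Nodup
      rw [List.nodup_flatMap]
      constructor
      · intro s _
        exact ih.map (fun a b h => by simpa using h)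
      · have hdisj : ∀ (s t : Int), s ≠ t →
            List.Disjoint ((pvCombos k).map (fun c => s :: c)) ((pvCombos k).map (fun c => t :: c)) := by
          intro s t hst x hxs hxt
          simp only [List.mem_map] at hxs hxt
          obtain ⟨c, _, rfl⟩ := hxs
          obtain ⟨d, _, he⟩ := hxt
          exact hst ((List.cons_eq_cons.mp he.symm).1)
        exact (by decide : pvS.Nodup).imp (fun h => hdisj _ _ h)

theorem pvCombos_ne_nil : ∀ k : Nat, pvCombos k ≠ [] := by
  intro k
  induction k with
  | zero => simp [pvCombos]
  | succ k ih =>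
      obtain ⟨c, hc⟩ := List.exists_mem_of_ne_nil _ ih
      apply List.ne_nil_of_mem (a := (40 : Int) :: c)
      show _ ∈ pvS.flatMap (fun s => (pvCombos k).map (fun c => s :: c))
      simp only [List.mem_flatMap, List.mem_map]
      exact ⟨40, by decide, c, hc, rfl⟩

theorem pvPerm_rev_combos (k : Nat) : ((pvCombos k).map List.reverse).Perm (pvCombos k) := by
  rw [List.perm_ext_iff_of_nodup ((pvNodup_combos k).map List.reverse_injective) (pvNodup_combos k)]
  intro c
  simp only [List.mem_map]
  constructor
  · rintro ⟨d, hd, rfl⟩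
    obtain ⟨hl, hall⟩ := (pvMem_combos k d).mp hd
    exact (pvMem_combos k _).mpr ⟨by simpa using hl, fun x hx => hall x (List.mem_reverse.mp hx)⟩
  · intro hc
    obtain ⟨hl, hall⟩ := (pvMem_combos k c).mp hc
    exact ⟨c.reverse, (pvMem_combos k _).mpr
      ⟨by simpa using hl, fun x hx => hall x (List.mem_reverse.mp hx)⟩, by simp⟩

theorem pvFoldl_pvOMin_some (l : List (Int × Int)) :
    ∀ a, l.foldl pvOMin (some a) = some (l.foldl pvMin a) := by
  induction l with
  | nil => intro a; rfl
  | cons x xs ih => intro a; exact ih (pvMin a x)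

theorem pvFoldl_neg (l : List (Int × Int)) :
    ∀ o, (l.map pvNeg).foldl pvOMin (Option.map pvNeg o) = Option.map pvNeg (l.foldl pvStepB o) := by
  induction l with
  | nil => intro o; rfl
  | cons x xs ih =>
      intro o
      have hstep : pvOMin (Option.map pvNeg o) (pvNeg x) = Option.map pvNeg (pvStepB o x) := by
        cases o with
        | none => rfl
        | some b =>
            show some (pvMin (pvNeg b) (pvNeg x)) = Option.map pvNeg (pvStepB (some b) x)
            rw [pvStepB_some]
            show some (if pvLexLt (pvNeg x) (pvNeg b) then pvNeg x else pvNeg b)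
              = some (pvNeg (if pvLexLt b x then x else b))
            rw [pvLexLt_neg, apply_ite pvNeg]
      show ((xs.map pvNeg).foldl pvOMin (pvOMin (Option.map pvNeg o) (pvNeg x))) = _
      rw [hstep, ih (pvStepB o x)]
      rfl

theorem pvFoldl_pvStepB_some (l : List (Int × Int)) :
    ∀ b, l.foldl pvStepB (some b) = some (l.foldl pvMax b) := by
  induction l with
  | nil => intro b; rfl
  | cons x xs ih =>
      intro b
      show xs.foldl pvStepB (pvStepB (some b) x) = _
      rw [pvStepB_some, ih (pvMax b x)]
      rfl

theorem pvSum_filter_ite (l : List (Int × Int)) (p : Int × Int → Bool) (f : Int × Int → Int) :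
    ((l.filter p).map f).sum = (l.map (fun x => if p x then f x else 0)).sum := by
  induction l with
  | nil => rfl
  | cons x xs ih => cases h : p x <;> simp [h, ih]

theorem pvEvalA_eq_pvEvalB (users : List (List Int)) (emoticons : List Int) (es : List Int)
    (h : es.length = emoticons.length) : pvEvalA users emoticons es = pvEvalB users emoticons es := by
  unfold pvEvalA pvEvalB
  congr 1
  funext heap user
  have htot : (List.range es.length).foldl (fun t i =>
      if user.getD 0 0 ≤ es.getD i 0 then
        t + (emoticons.getD i 0 - PySem.Int.floordiv (emoticons.getD i 0 * es.getD i 0) 100)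
      else t) 0
      = (((emoticons.zip es).filter (fun ps => user.getD 0 0 ≤ ps.2)).map
          (fun ps => ps.1 - PySem.Int.floordiv (ps.1 * ps.2) 100)).sum := by
    have hfn : (fun (t : Int) (i : Nat) =>
        if user.getD 0 0 ≤ es.getD i 0 then
          t + (emoticons.getD i 0 - PySem.Int.floordiv (emoticons.getD i 0 * es.getD i 0) 100)
        else t)
        = (fun (t : Int) (i : Nat) => t +
            if user.getD 0 0 ≤ es.getD i 0 then
              emoticons.getD i 0 - PySem.Int.floordiv (emoticons.getD i 0 * es.getD i 0) 100
            else 0) := by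
      funext t i; split <;> simp
    rw [hfn, PySem.List.foldl_add, zero_add, pvSum_filter_ite]
    congr 1
    apply List.ext_getElem
    · simp [h]
    · intro i h1 h2
      have hi : i < es.length := by simpa using h1
      have hi' : i < emoticons.length := by omega
      simp only [List.getElem_map, List.getElem_range, List.getElem_zip,
        List.getD_eq_getElem _ _ hi, List.getD_eq_getElem _ _ hi']
      simp
  rw [htot]

-- ===== VERDICT (by name: the statement is the Claim_ definition above) =====
theorem solution_spec : Claim_equal_solution := by
  intro users emoticons _hdom _hpre
  unfold Spec_solution
  haveI : RightCommutative pvStepB := ⟨pvStepB_rcomm⟩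
  set n := emoticons.length with hn
  set g := fun e => pvEvalA users emoticons e with hg
  set gB := fun e => pvEvalB users emoticons e with hgB
  -- the list A's dfs pushes
  have hL : pvDfsA users emoticons n (List.replicate n 0) []
      = ((pvCombos n).map List.reverse).map (fun e => pvNeg (g e)) := by
    rw [pvDfsA_spec users emoticons n (List.replicate n 0) []]
    rw [pvProdRev_eq n (List.replicate n 0) (by simp)]
    rw [List.drop_replicate]
    simp only [Nat.sub_self, List.replicate_zero]
    rw [pvRp_eq_map_reverse]
    simp only [List.map_map, List.nil_append]
    apply List.map_congr_left
    intro c _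
    simp [Function.comp, hg]
  -- A's minimum equals the negated B maximum
  have hmin : some (pvHeapMin (pvDfsA users emoticons n (List.replicate n 0) []))
      = Option.map pvNeg (((pvCombos n).map gB).foldl pvStepB none) := by
    rw [hL]
    have h1 : ((pvCombos n).map List.reverse).map (fun e => pvNeg (g e))
        = (((pvCombos n).map List.reverse).map g).map pvNeg := by
      simp [List.map_map, Function.comp_def]
    obtain ⟨x, xs, hxe⟩ : ∃ x xs, ((pvCombos n).map List.reverse).map (fun e => pvNeg (g e)) = x :: xs := by
      rcases he : ((pvCombos n).map List.reverse).map (fun e => pvNeg (g e)) with _ | ⟨x, xs⟩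
      · exact absurd (by simpa using he) (pvCombos_ne_nil n)
      · exact ⟨x, xs, rfl⟩
    have hpop : some (pvHeapMin (x :: xs)) = (x :: xs).foldl pvOMin none := by
      show some (xs.foldl pvMin x) = xs.foldl pvOMin (some x)
      rw [pvFoldl_pvOMin_some]
    rw [hxe, hpop, ← hxe, h1]
    have h2 := pvFoldl_neg (((pvCombos n).map List.reverse).map g) none
    simp only [Option.map_none] at h2
    rw [h2]
    congr 1
    have hperm : ((((pvCombos n).map List.reverse).map g)).Perm ((pvCombos n).map g) :=
      (pvPerm_rev_combos n).map g
    rw [hperm.foldl_eq none]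
    congr 1
    apply List.map_congr_left
    intro c hc
    exact pvEvalA_eq_pvEvalB users emoticons c (((pvMem_combos n c).mp hc).1)
  -- B's fold is a `some`
  obtain ⟨y, ys, hye⟩ : ∃ y ys, (pvCombos n).map gB = y :: ys := by
    rcases he : (pvCombos n).map gB with _ | ⟨y, ys⟩
    · exact absurd (by simpa using he) (pvCombos_ne_nil n)
    · exact ⟨y, ys, rfl⟩
  have hbest : ((pvCombos n).map gB).foldl pvStepB none = some (ys.foldl pvMax y) := by
    rw [hye]
    show ys.foldl pvStepB (some y) = _
    exact pvFoldl_pvStepB_some ys y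
  set best := ys.foldl pvMax y with hbd
  have hm : pvHeapMin (pvDfsA users emoticons n (List.replicate n 0) []) = pvNeg best := by
    have hsome := hmin
    rw [hbest] at hsome
    simp only [Option.map_some] at hsome
    exact Option.some.inj hsome
  show [-(pvHeapMin (pvDfsA users emoticons n (List.replicate n 0) [])).1,
        -(pvHeapMin (pvDfsA users emoticons n (List.replicate n 0) [])).2] = solution_alt users emoticons
  rw [hm]
  show [-(-best.1), -(-best.2)] = solution_alt users emoticons
  unfold solution_alt
  have hfold : List.foldl (fun be sales => pvStepB be (pvEvalB users emoticons sales)) none (pvCombos n)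
      = ((pvCombos n).map gB).foldl pvStepB none := (List.foldl_map).symm
  rw [hfold, hbest]
  simp
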